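-- pv_equiv track=rewrite | github.com/ngilles/adventofcode-2020 | day_07.py | find_containers
-- ===== SOURCE A (Python) =====
-- from collections import deque
--
-- def find_containers(mapping, bag):
--     seen = set()
--     visit = deque([bag])
--     while visit:
--         bag = visit.popleft()
--         for c in mapping[bag]["contained_by"]:
--             if c not in seen:
--                 seen.add(c)
--                 visit.append(c)
--
--     return seen
-- ===== SOURCE B (Python) =====
-- def find_containers(mapping, bag):
--     # Level-by-level BFS: expand the whole frontier each round with plain
--     # lists, no deque; seen is updated once per round.
--     seen = set()
--     frontier = [bag]
--     while frontier:
--         nxt = []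
--         for b in frontier:
--             for c in mapping[b]["contained_by"]:
--                 if c not in seen and c not in nxt:
--                     nxt.append(c)
--         seen.update(nxt)
--         frontier = nxt
--     return seen
-- ===== Notes on version B (the rewrite author's own statement) =====
-- stated objective: alternative
-- what changed: Replaces the deque-driven node-at-a-time BFS with a level-synchronous BFS: each round expands the whole frontier into a fresh next-frontier list and merges it into seen once, so no queue data structure is maintained.
import Mathlib
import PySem

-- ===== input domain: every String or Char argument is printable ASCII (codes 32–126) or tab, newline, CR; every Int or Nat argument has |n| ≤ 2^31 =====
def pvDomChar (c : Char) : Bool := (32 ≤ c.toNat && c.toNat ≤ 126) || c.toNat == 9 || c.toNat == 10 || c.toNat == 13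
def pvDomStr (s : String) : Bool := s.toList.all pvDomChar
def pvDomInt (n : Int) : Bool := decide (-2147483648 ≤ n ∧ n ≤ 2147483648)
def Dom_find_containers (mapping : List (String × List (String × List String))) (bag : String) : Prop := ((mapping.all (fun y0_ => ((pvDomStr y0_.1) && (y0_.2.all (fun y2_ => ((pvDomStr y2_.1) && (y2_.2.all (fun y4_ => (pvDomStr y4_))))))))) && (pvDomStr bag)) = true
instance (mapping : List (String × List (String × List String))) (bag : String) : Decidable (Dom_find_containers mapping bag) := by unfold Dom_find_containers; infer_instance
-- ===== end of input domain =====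

-- B replaces A's deque-driven node-at-a-time BFS by a level-synchronous BFS over plain lists (alternative decomposition; same asymptotic cost).

-- first-match association-list lookup = Python dict subscript (dicts carry unique keys; none = KeyError)
def pvLookup {α : Type} (m : List (String × α)) (k : String) : Option α :=
  match m with
  | [] => none
  | (k', v) :: rest => if k' == k then some v else pvLookup rest k

-- mapping[b]["contained_by"]; 'none' (KeyError) is excluded by Pre_, the .getD [] is never reached there
def pvNbs (m : List (String × List (String × List String))) (b : String) : List String :=
  ((pvLookup m b).bind (fun d => pvLookup d "contained_by")).getD []

-- all names occurring in any inner list (termination-measure universe only)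
def pvAll (m : List (String × List (String × List String))) : List String :=
  m.flatMap (fun kv => kv.2.flatMap (fun kv2 => kv2.2))

-- how many universe names are not yet seen (termination measure only)
def pvRem (m : List (String × List (String × List String))) (seen : List String) : Nat :=
  ((pvAll m).toFinset \ seen.toFinset).card

-- ===== PORT A =====
-- 'if c not in seen: seen.add(c); visit.append(c)' — state (seen, visit)
def pvStepA (p : List String × List String) (c : String) : List String × List String :=
  if p.1.contains c then p else (p.1 ++ [c], p.2 ++ [c])

lemma pvInnerA_spec (cs : List String) : ∀ (s t : List String),
    ∃ h, cs.foldl pvStepA (s, t) = (s ++ h, t ++ h) ∧ h.Nodup ∧ ∀ x ∈ h, x ∈ cs ∧ x ∉ s := by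
  induction cs with
  | nil => intro s t; exact ⟨[], by simp⟩
  | cons c cs ih =>
    intro s t
    simp only [List.foldl_cons, pvStepA]
    by_cases hc : s.contains c
    · simp only [hc, if_pos]
      obtain ⟨h, he, hnd, hmem⟩ := ih s t
      exact ⟨h, he, hnd, fun x hx => ⟨List.mem_cons_of_mem _ (hmem x hx).1, (hmem x hx).2⟩⟩
    · simp only [hc, if_neg, Bool.false_eq_true, not_false_iff]
      obtain ⟨h, he, hnd, hmem⟩ := ih (s ++ [c]) (t ++ [c])
      refine ⟨c :: h, ?_, ?_, ?_⟩
      · simpa [List.append_assoc] using he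
      · exact List.nodup_cons.mpr ⟨fun hch => by simpa using ((hmem c hch).2 (by simp)), hnd⟩
      · intro x hx
        rcases List.mem_cons.mp hx with rfl | hx'
        · exact ⟨by simp, fun hxs => hc (List.contains_iff_mem.mpr hxs)⟩
        · exact ⟨List.mem_cons_of_mem _ (hmem x hx').1,
            fun hxs => (hmem x hx').2 (by simp [hxs])⟩

lemma pvLookup_mem {α : Type} (k : String) (v : α) :
    ∀ (m : List (String × α)), pvLookup m k = some v → ∃ k', (k', v) ∈ m := by
  intro m
  induction m with
  | nil => intro h; simp [pvLookup] at h
  | cons p rest ih =>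
    obtain ⟨k', v'⟩ := p
    intro h
    rw [pvLookup] at h
    by_cases hk : (k' == k) = true
    · rw [if_pos hk] at h
      injection h with h2
      subst h2
      exact ⟨k', List.mem_cons_self⟩
    · rw [if_neg hk] at h
      obtain ⟨k'', hm⟩ := ih h
      exact ⟨k'', List.mem_cons_of_mem _ hm⟩

lemma pvNbs_sub (m : List (String × List (String × List String))) (b : String) :
    ∀ x ∈ pvNbs m b, x ∈ pvAll m := by
  intro x hx
  unfold pvNbs at hx
  cases hm : pvLookup m b with
  | none => simp [hm] at hx
  | some d =>
    cases hl : pvLookup d "contained_by" with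
    | none => simp [hm, hl] at hx
    | some l =>
      simp only [hm, hl, Option.bind_some, Option.getD_some] at hx
      obtain ⟨k1, hk1⟩ := pvLookup_mem b d m hm
      obtain ⟨k2, hk2⟩ := pvLookup_mem "contained_by" l d hl
      simp only [pvAll, List.mem_flatMap]
      exact ⟨(k1, d), hk1, ⟨(k2, l), hk2, hx⟩⟩

lemma pvRem_append (m : List (String × List (String × List String))) (s h : List String)
    (hnd : h.Nodup) (hx : ∀ x ∈ h, x ∈ pvAll m ∧ x ∉ s) :
    pvRem m (s ++ h) + h.length = pvRem m s := by
  have hsub : h.toFinset ⊆ (pvAll m).toFinset \ s.toFinset := by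
    intro x hxf
    rw [List.mem_toFinset] at hxf
    rw [Finset.mem_sdiff, List.mem_toFinset, List.mem_toFinset]
    exact ⟨(hx x hxf).1, (hx x hxf).2⟩
  have h1 : (s ++ h).toFinset = s.toFinset ∪ h.toFinset := List.toFinset_append
  have h2 : (pvAll m).toFinset \ (s.toFinset ∪ h.toFinset) =
      ((pvAll m).toFinset \ s.toFinset) \ h.toFinset := by
    ext a; simp only [Finset.mem_sdiff, Finset.mem_union]; tauto
  have hinter : h.toFinset ∩ ((pvAll m).toFinset \ s.toFinset) = h.toFinset :=
    Finset.inter_eq_left.mpr hsub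
  have h3 : (((pvAll m).toFinset \ s.toFinset) \ h.toFinset).card =
      ((pvAll m).toFinset \ s.toFinset).card - h.toFinset.card := by
    rw [Finset.card_sdiff, hinter]
  have h4 : h.toFinset.card = h.length := List.toFinset_card_of_nodup hnd
  have h5 : h.toFinset.card ≤ ((pvAll m).toFinset \ s.toFinset).card := Finset.card_le_card hsub
  unfold pvRem
  rw [h1, h2, h3]
  omega

lemma pvDecA (m : List (String × List (String × List String))) (seen rest : List String) (b : String) :
    2 * pvRem m ((pvNbs m b).foldl pvStepA (seen, rest)).1 +
      ((pvNbs m b).foldl pvStepA (seen, rest)).2.length <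
    2 * pvRem m seen + (b :: rest).length := by
  obtain ⟨h, he, hnd, hmem⟩ := pvInnerA_spec (pvNbs m b) seen rest
  have hx : ∀ x ∈ h, x ∈ pvAll m ∧ x ∉ seen :=
    fun x hxh => ⟨pvNbs_sub m b x (hmem x hxh).1, (hmem x hxh).2⟩
  have := pvRem_append m seen h hnd hx
  rw [he]
  simp only [List.length_append, List.length_cons]
  omega

def pvBfsA (m : List (String × List (String × List String))) (seen visit : List String) : List String :=
  match visit with
  | [] => seen
  | b :: rest =>
    let p := (pvNbs m b).foldl pvStepA (seen, rest)
    pvBfsA m p.1 p.2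
termination_by 2 * pvRem m seen + visit.length
decreasing_by exact pvDecA m seen rest b

def find_containers (mapping : List (String × List (String × List String))) (bag : String) : List String :=
  pvBfsA mapping [] [bag]

-- ===== PORT B =====
-- 'if c not in seen and c not in nxt: nxt.append(c)' — state nxt, seen fixed over the round
def pvStepB (seen nxt : List String) (c : String) : List String :=
  if seen.contains c || nxt.contains c then nxt else nxt ++ [c]

-- one round: the fresh names discovered from the whole frontier
def pvLevel (m : List (String × List (String × List String))) (seen frontier : List String) : List String :=
  frontier.foldl (fun nxt b => (pvNbs m b).foldl (pvStepB seen) nxt) []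

lemma pvFoldB_spec (seen : List String) (cs : List String) : ∀ d : List String, d.Nodup →
    (cs.foldl (pvStepB seen) d).Nodup ∧
    ∀ x ∈ cs.foldl (pvStepB seen) d, x ∈ d ∨ (x ∈ cs ∧ x ∉ seen) := by
  induction cs with
  | nil => intro d hd; exact ⟨hd, fun x hx => Or.inl hx⟩
  | cons c cs ih =>
    intro d hd
    simp only [List.foldl_cons, pvStepB]
    by_cases hc : seen.contains c || d.contains c
    · simp only [hc, if_pos]
      obtain ⟨h1, h2⟩ := ih d hd
      exact ⟨h1, fun x hx => (h2 x hx).imp id (fun ⟨a, b⟩ => ⟨List.mem_cons_of_mem _ a, b⟩)⟩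
    · simp only [hc, if_neg, Bool.false_eq_true, not_false_iff]
      have hcd : c ∉ d := fun hm => hc (by simp [hm])
      have hcs : c ∉ seen := fun hm => hc (by simp [hm])
      have hndc : (d ++ [c]).Nodup := by
        simp only [List.nodup_append, List.nodup_singleton, hd, true_and]
        intro a ha b hb
        simp only [List.mem_singleton] at hb
        subst hb
        exact fun h => hcd (h ▸ ha)
      obtain ⟨h1, h2⟩ := ih (d ++ [c]) hndc
      refine ⟨h1, fun x hx => ?_⟩
      rcases h2 x hx with hxd | ⟨hxc, hxs⟩
      · rcases List.mem_append.mp hxd with hxd' | hxc'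
        · exact Or.inl hxd'
        · have hxe : x = c := List.mem_singleton.mp hxc'
          subst hxe
          exact Or.inr ⟨List.mem_cons_self, hcs⟩
      · exact Or.inr ⟨List.mem_cons_of_mem _ hxc, hxs⟩

lemma pvLevel_spec (m : List (String × List (String × List String))) (seen : List String)
    (f : List String) : ∀ d : List String, d.Nodup → (∀ x ∈ d, x ∈ pvAll m ∧ x ∉ seen) →
    (f.foldl (fun nxt b => (pvNbs m b).foldl (pvStepB seen) nxt) d).Nodup ∧
    ∀ x ∈ f.foldl (fun nxt b => (pvNbs m b).foldl (pvStepB seen) nxt) d, x ∈ pvAll m ∧ x ∉ seen := by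
  induction f with
  | nil => intro d hd hdx; exact ⟨hd, hdx⟩
  | cons b f ih =>
    intro d hd hdx
    simp only [List.foldl_cons]
    obtain ⟨h1, h2⟩ := pvFoldB_spec seen (pvNbs m b) d hd
    refine ih _ h1 (fun x hx => ?_)
    rcases h2 x hx with hxd | ⟨hxc, hxs⟩
    · exact hdx x hxd
    · exact ⟨pvNbs_sub m b x hxc, hxs⟩

lemma pvUpdate_fresh (nxt : List String) : ∀ seen : List String, nxt.Nodup →
    (∀ x ∈ nxt, x ∉ seen) → PySem.Set.update seen nxt = seen ++ nxt := by
  intro seen hnd hfr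
  exact PySem.Set.update_eq_append_of_disjoint seen nxt hnd hfr

lemma pvDecB (m : List (String × List (String × List String))) (seen : List String)
    (b : String) (rest : List String) :
    2 * pvRem m (PySem.Set.update seen (pvLevel m seen (b :: rest))) +
      (pvLevel m seen (b :: rest)).length <
    2 * pvRem m seen + (b :: rest).length := by
  obtain ⟨hnd, hmem⟩ := pvLevel_spec m seen (b :: rest) [] (by simp) (by simp)
  have hupd := pvUpdate_fresh (pvLevel m seen (b :: rest)) seen hnd (fun x hx => (hmem x hx).2)
  have := pvRem_append m seen (pvLevel m seen (b :: rest)) hnd hmem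
  rw [hupd]
  simp only [List.length_cons]
  omega

def pvBfsB (m : List (String × List (String × List String))) (seen frontier : List String) : List String :=
  match frontier with
  | [] => seen
  | b :: rest =>
    let nxt := pvLevel m seen (b :: rest)
    pvBfsB m (PySem.Set.update seen nxt) nxt
termination_by 2 * pvRem m seen + frontier.length
decreasing_by exact pvDecB m seen b rest

def find_containers_alt (mapping : List (String × List (String × List String))) (bag : String) : List String :=
  pvBfsB mapping [] [bag]

-- ===== PRECONDITION & SPEC =====
-- A raises KeyError when a visited bag is not a mapping key or its entry lacks "contained_by";
-- for a closed form, Pre_ requires this of bag and of every key NAMED in any "contained_by" list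
-- (a superset of the keys A actually visits), so it also excludes some inputs on which A returns
-- (mappings whose problematic entries are named only in unreachable entries).
def Pre_find_containers (mapping : List (String × List (String × List String))) (bag : String) : Prop :=
  bag ∈ mapping.map Prod.fst ∧
  ∀ kv ∈ mapping,
    (kv.1 = bag ∨ ∃ kv' ∈ mapping, ∃ kv2 ∈ kv'.2, kv2.1 = "contained_by" ∧ kv.1 ∈ kv2.2) →
    "contained_by" ∈ kv.2.map Prod.fst ∧
      ∀ kv2 ∈ kv.2, kv2.1 = "contained_by" → ∀ c ∈ kv2.2, c ∈ mapping.map Prod.fst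
instance (mapping : List (String × List (String × List String))) (bag : String) : Decidable (Pre_find_containers mapping bag) := by unfold Pre_find_containers; infer_instance

def pvWitness_find_containers : (List (String × List (String × List String))) × String :=
  ([("shiny gold", [("contained_by", ["muted yellow"])]), ("muted yellow", [("contained_by", [])])], "shiny gold")

def Spec_find_containers (mapping : List (String × List (String × List String))) (bag : String) (out : List String) : Prop := out = find_containers_alt mapping bag
instance (mapping : List (String × List (String × List String))) (bag : String) (out : List String) : Decidable (Spec_find_containers mapping bag out) := by unfold Spec_find_containers; infer_instance

-- ===== CLAIM (what is proved, stated in full; the proofs are below) =====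
def Claim_equal_find_containers : Prop := ∀ (mapping : List (String × List (String × List String))) (bag : String), Dom_find_containers mapping bag → Pre_find_containers mapping bag → Spec_find_containers mapping bag (find_containers mapping bag)

-- ===== LEMMAS AND PROOFS =====

lemma pvBfsA_nil (m : List (String × List (String × List String))) (seen : List String) :
    pvBfsA m seen [] = seen := by rw [pvBfsA.eq_def]

lemma pvBfsA_cons (m : List (String × List (String × List String))) (seen : List String)
    (b : String) (rest : List String) :
    pvBfsA m seen (b :: rest) =
      pvBfsA m ((pvNbs m b).foldl pvStepA (seen, rest)).1
               ((pvNbs m b).foldl pvStepA (seen, rest)).2 := by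
  rw [pvBfsA.eq_def]

lemma pvBfsB_nil (m : List (String × List (String × List String))) (seen : List String) :
    pvBfsB m seen [] = seen := by rw [pvBfsB.eq_def]

lemma pvBfsB_cons (m : List (String × List (String × List String))) (seen : List String)
    (b : String) (rest : List String) :
    pvBfsB m seen (b :: rest) =
      pvBfsB m (PySem.Set.update seen (pvLevel m seen (b :: rest))) (pvLevel m seen (b :: rest)) := by
  rw [pvBfsB.eq_def]


-- A's inner fold is a pair of appends driven only by its first component
lemma pvFoldA_pair (cs : List String) : ∀ s t : List String,
    cs.foldl pvStepA (s, t) = ((cs.foldl pvStepA (s, [])).1, t ++ (cs.foldl pvStepA (s, [])).2) := by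
  induction cs with
  | nil => intro s t; simp
  | cons c cs ih =>
    intro s t
    simp only [List.foldl_cons, pvStepA]
    by_cases hc : s.contains c
    · simp only [hc, if_pos]
      exact ih s t
    · simp only [hc, Bool.false_eq_true, if_neg, not_false_iff]
      rw [ih (s ++ [c]) (t ++ [c]), ih (s ++ [c]) ([] ++ [c])]
      simp [List.append_assoc]

-- the level fold of A (proof-side only)
def pvLvlA (m : List (String × List (String × List String))) (seen f : List String) :
    List String × List String :=
  f.foldl (fun p b => (pvNbs m b).foldl pvStepA p) (seen, [])

lemma pvLvlA_pair (m : List (String × List (String × List String))) (f : List String) :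
    ∀ s t : List String,
    f.foldl (fun p b => (pvNbs m b).foldl pvStepA p) (s, t) =
      ((pvLvlA m s f).1, t ++ (pvLvlA m s f).2) := by
  induction f with
  | nil => intro s t; simp [pvLvlA]
  | cons b f ih =>
    intro s t
    simp only [pvLvlA, List.foldl_cons]
    conv_lhs => rw [pvFoldA_pair (pvNbs m b) s t]
    conv_rhs => rw [pvFoldA_pair (pvNbs m b) s []]
    rw [List.nil_append]
    rw [ih ((pvNbs m b).foldl pvStepA (s, [])).1 (t ++ ((pvNbs m b).foldl pvStepA (s, [])).2),
        ih ((pvNbs m b).foldl pvStepA (s, [])).1 ((pvNbs m b).foldl pvStepA (s, [])).2]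
    simp [List.append_assoc]

-- processing a block f at the head of the queue = one level expansion
lemma pvBlock (m : List (String × List (String × List String))) (f : List String) :
    ∀ (n seen : List String),
    pvBfsA m seen (f ++ n) = pvBfsA m (pvLvlA m seen f).1 (n ++ (pvLvlA m seen f).2) := by
  induction f with
  | nil =>
    intro n seen
    simp [pvLvlA]
  | cons b f ih =>
    intro n seen
    rcases hX : (pvNbs m b).foldl pvStepA (seen, []) with ⟨P1, h⟩
    have hR : pvLvlA m seen (b :: f) = ((pvLvlA m P1 f).1, h ++ (pvLvlA m P1 f).2) := by
      simp only [pvLvlA, List.foldl_cons]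
      rw [pvFoldA_pair (pvNbs m b) seen [], hX]
      dsimp only
      rw [List.nil_append]
      exact pvLvlA_pair m f P1 h
    rw [List.cons_append, pvBfsA_cons, pvFoldA_pair (pvNbs m b) seen (f ++ n), hX]
    dsimp only
    rw [List.append_assoc, ih (n ++ h) P1, hR]
    dsimp only
    rw [List.append_assoc]

-- A's level fold from (seen ++ d, d) mirrors B's level fold from d
lemma pvInnerAB (seen : List String)
    (cs : List String) : ∀ d : List String,
    cs.foldl pvStepA (seen ++ d, d) =
      (seen ++ cs.foldl (pvStepB seen) d, cs.foldl (pvStepB seen) d) := by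
  induction cs with
  | nil => intro d; simp
  | cons c cs ih =>
    intro d
    simp only [List.foldl_cons, pvStepA, pvStepB, List.contains_append]
    by_cases hc : (seen.contains c || d.contains c) = true
    · simp only [hc, if_pos]
      exact ih d
    · simp only [hc, Bool.false_eq_true, if_neg, not_false_iff, List.append_assoc]
      exact ih (d ++ [c])

lemma pvLvlAB (m : List (String × List (String × List String))) (seen : List String)
    (f : List String) : ∀ d : List String,
    f.foldl (fun p b => (pvNbs m b).foldl pvStepA p) (seen ++ d, d) =
      (seen ++ f.foldl (fun nxt b => (pvNbs m b).foldl (pvStepB seen) nxt) d,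
        f.foldl (fun nxt b => (pvNbs m b).foldl (pvStepB seen) nxt) d) := by
  induction f with
  | nil => intro d; simp
  | cons b f ih =>
    intro d
    simp only [List.foldl_cons]
    rw [pvInnerAB seen (pvNbs m b) d]
    exact ih ((pvNbs m b).foldl (pvStepB seen) d)

lemma pvLvlA_eq_level (m : List (String × List (String × List String))) (seen f : List String) :
    pvLvlA m seen f = (seen ++ pvLevel m seen f, pvLevel m seen f) := by
  have h := pvLvlAB m seen f []
  rw [List.append_nil] at h
  unfold pvLvlA pvLevel
  exact h

lemma pvMain (m : List (String × List (String × List String))) :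
    ∀ (k : Nat) (seen f : List String), 2 * pvRem m seen + f.length ≤ k →
    pvBfsA m seen f = pvBfsB m seen f := by
  intro k
  induction k with
  | zero =>
    intro seen f h
    have hf : f = [] := List.eq_nil_of_length_eq_zero (by omega)
    subst hf
    rw [pvBfsA_nil, pvBfsB_nil]
  | succ k ih =>
    intro seen f h
    cases f with
    | nil => rw [pvBfsA_nil, pvBfsB_nil]
    | cons b rest =>
      obtain ⟨hnd, hmem⟩ := pvLevel_spec m seen (b :: rest) [] (by simp) (by simp)
      have hupd : PySem.Set.update seen (pvLevel m seen (b :: rest)) =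
          seen ++ pvLevel m seen (b :: rest) :=
        pvUpdate_fresh _ seen hnd (fun x hx => (hmem x hx).2)
      have hA : pvBfsA m seen (b :: rest) =
          pvBfsA m (seen ++ pvLevel m seen (b :: rest)) (pvLevel m seen (b :: rest)) := by
        have hb := pvBlock m (b :: rest) [] seen
        rw [List.append_nil, pvLvlA_eq_level] at hb
        rw [hb]
        dsimp only
        rw [List.nil_append]
      have hB : pvBfsB m seen (b :: rest) =
          pvBfsB m (seen ++ pvLevel m seen (b :: rest)) (pvLevel m seen (b :: rest)) := by
        rw [pvBfsB_cons, hupd]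
      rw [hA, hB]
      apply ih
      have hdec := pvDecB m seen b rest
      rw [hupd] at hdec
      simp only [List.length_cons] at h hdec ⊢
      omega

-- ===== VERDICT (by name: the statement is the Claim_ definition above) =====
theorem find_containers_spec : Claim_equal_find_containers := by
  intro mapping bag _ _
  unfold Spec_find_containers find_containers find_containers_alt
  exact pvMain mapping (2 * pvRem mapping [] + 1) [] [bag] (by simp)
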